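-- pv_equiv track=rewrite | github.com/Naman09746/MeetDigest | modules/diarization.py | _relabel_speakers
-- ===== SOURCE A (Python) =====
-- from typing import List, Tuple, BinaryIO, Dict, Optional, Literal, NamedTuple
--
-- def _relabel_speakers(speaker_segments: List[Tuple[str, str]]) -> List[Tuple[str, str]]:
--     """Convert SPEAKER_0, SPEAKER_1 to Speaker 1, Speaker 2."""
--     speaker_mapping = {}
--     next_speaker_num = 1
--
--     relabeled = []
--     for original_speaker, text in speaker_segments:
--         if original_speaker not in speaker_mapping:
--             if original_speaker.startswith("SPEAKER_"):
--                 speaker_mapping[original_speaker] = f"Speaker {next_speaker_num}"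
--                 next_speaker_num += 1
--             else:
--                 speaker_mapping[original_speaker] = original_speaker
--
--         new_label = speaker_mapping[original_speaker]
--         relabeled.append((new_label, text))
--
--     return relabeled
-- ===== SOURCE B (Python) =====
-- from typing import List, Tuple
--
-- def _relabel_speakers(speaker_segments: List[Tuple[str, str]]) -> List[Tuple[str, str]]:
--     """Convert SPEAKER_0, SPEAKER_1 to Speaker 1, Speaker 2."""
--     unique = list(dict.fromkeys(spk for spk, _ in speaker_segments
--                                 if spk.startswith("SPEAKER_")))
--     mapping = {label: f"Speaker {i}" for i, label in enumerate(unique, 1)}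
--     return [(mapping.get(spk, spk), text) for spk, text in speaker_segments]
-- ===== Notes on version B (the rewrite author's own statement) =====
-- stated objective: simpler
-- what changed: Replaces the fused single pass that threads a mutable mapping, a counter and an output accumulator with an index-then-map decomposition: first build the whole relabeling table (ordered dedup of SPEAKER_-prefixed labels, enumerated from 1), then emit the result with one comprehension where non-SPEAKER labels fall through unchanged.
import Mathlib
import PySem

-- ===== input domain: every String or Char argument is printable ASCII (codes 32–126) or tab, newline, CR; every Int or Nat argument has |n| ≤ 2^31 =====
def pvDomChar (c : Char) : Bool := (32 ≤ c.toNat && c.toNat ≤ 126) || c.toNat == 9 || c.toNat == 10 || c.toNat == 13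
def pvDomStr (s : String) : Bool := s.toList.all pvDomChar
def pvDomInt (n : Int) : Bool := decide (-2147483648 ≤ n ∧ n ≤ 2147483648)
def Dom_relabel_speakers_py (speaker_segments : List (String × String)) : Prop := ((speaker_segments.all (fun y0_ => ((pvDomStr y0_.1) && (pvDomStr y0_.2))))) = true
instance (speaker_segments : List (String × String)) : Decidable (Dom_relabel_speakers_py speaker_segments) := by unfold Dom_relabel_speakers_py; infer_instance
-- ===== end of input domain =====

-- B replaces A's fused single pass (mutable mapping + counter + accumulator) by an
-- index-then-map decomposition: build the whole relabeling table first, then map; same cost.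

-- ===== PORT A =====
-- the single fused loop of A: state = (speaker_mapping, next_speaker_num, relabeled-reversed)
def relabelGoA (segs : List (String × String)) (mapping : PySem.Dict String String)
    (next : Int) (acc : List (String × String)) : List (String × String) :=
  match segs with
  | [] => acc.reverse
  | (spk, text) :: rest =>
    if mapping.contains spk then
      -- key present: speaker_mapping[original_speaker]; getD's default is never used
      relabelGoA rest mapping next ((mapping.getD spk spk, text) :: acc)
    else if PySem.Str.startswith spk "SPEAKER_" then
      let m' := mapping.insert spk ("Speaker " ++ PySem.Int.toStr next)
      relabelGoA rest m' (next + 1) ((m'.getD spk spk, text) :: acc)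
    else
      let m' := mapping.insert spk spk
      relabelGoA rest m' next ((m'.getD spk spk, text) :: acc)

def relabel_speakers_py (speaker_segments : List (String × String)) : List (String × String) :=
  relabelGoA speaker_segments PySem.Dict.empty 1 []

-- ===== PORT B =====
def relabel_speakers_py_alt (speaker_segments : List (String × String)) : List (String × String) :=
  let unique : List String :=
    PySem.List.dedup ((speaker_segments.filter
      (fun p => PySem.Str.startswith p.1 "SPEAKER_")).map Prod.fst)
  let mapping : PySem.Dict String String :=
    (PySem.List.enumerate unique 1).foldl
      (fun d p => d.insert p.2 ("Speaker " ++ PySem.Int.toStr p.1)) PySem.Dict.empty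
  speaker_segments.map (fun p => (mapping.getD p.1 p.1, p.2))

-- ===== PRECONDITION & SPEC =====
def Spec_relabel_speakers_py (speaker_segments : List (String × String)) (out : List (String × String)) : Prop := out = relabel_speakers_py_alt speaker_segments
instance (speaker_segments : List (String × String)) (out : List (String × String)) : Decidable (Spec_relabel_speakers_py speaker_segments out) := by unfold Spec_relabel_speakers_py; infer_instance

-- ===== CLAIM (what is proved, stated in full; the proofs are below) =====
def Claim_equal_relabel_speakers_py : Prop := ∀ (speaker_segments : List (String × String)), Dom_relabel_speakers_py speaker_segments → Spec_relabel_speakers_py speaker_segments (relabel_speakers_py speaker_segments)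

-- ===== LEMMAS AND PROOFS =====

-- the unique SPEAKER_ labels contributed by `segs` when `seen` have already been emitted
def uA (seen : List String) : List (String × String) → List String
  | [] => []
  | (s, _) :: r =>
    if PySem.Str.startswith s "SPEAKER_" = true ∧ s ∉ seen then
      s :: uA (seen ++ [s]) r
    else uA seen r

-- the final label of s given the unique list U with numbering starting at n
def gLab (n : Int) (U : List String) (s : String) : String :=
  match U with
  | [] => s
  | x :: xs => if s = x then "Speaker " ++ PySem.Int.toStr n else gLab (n + 1) xs s

lemma gLab_cons_self (n : Int) (xs : List String) (s : String) :
    gLab n (s :: xs) s = "Speaker " ++ PySem.Int.toStr n := by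
  simp [gLab]

lemma gLab_append_of_not_mem (n : Int) (xs ys : List String) (s : String) (h : s ∉ xs) :
    gLab n (xs ++ ys) s = gLab (n + (xs.length : Int)) ys s := by
  induction xs generalizing n with
  | nil => simp
  | cons x xs ih =>
    have hx : s ≠ x := fun he => h (he ▸ List.mem_cons_self)
    have hxs : s ∉ xs := fun hm => h (List.mem_cons_of_mem _ hm)
    simp only [List.cons_append, gLab, if_neg hx, ih _ hxs, List.length_cons]
    congr 1
    push_cast
    omega

-- B's dictionary built from the enumerated unique list looks up like gLab
lemma getD_enumFold (U : List String) (n : Int) (d : PySem.Dict String String)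
    (s dflt : String) (hnd : U.Nodup) :
    ((PySem.List.enumerate U n).foldl
      (fun d p => d.insert p.2 ("Speaker " ++ PySem.Int.toStr p.1)) d).getD s dflt
    = if s ∈ U then gLab n U s else d.getD s dflt := by
  induction U generalizing n d with
  | nil => simp [PySem.List.enumerate_nil]
  | cons x xs ih =>
    rw [PySem.List.enumerate_cons]
    simp only [List.foldl_cons]
    rw [ih _ _ (List.Nodup.of_cons hnd)]
    by_cases hx : s = x
    · subst hx
      have hxs : s ∉ xs := (List.nodup_cons.mp hnd).1
      rw [if_neg hxs, PySem.Dict.getD_insert_self]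
      simp [gLab]
    · rw [PySem.Dict.getD_insert_of_ne _ _ _ hx]
      by_cases hm : s ∈ xs
      · simp [hm, hx, gLab, List.mem_cons]
      · simp [hm, hx, List.mem_cons]

-- dedup of the filtered labels is uA, with `seen` generalized
lemma dedup_filter_eq_uA (segs : List (String × String)) (seen : List String) :
    ((segs.filter (fun p => PySem.Str.startswith p.1 "SPEAKER_")).map Prod.fst).foldl
      PySem.Set.add seen = seen ++ uA seen segs := by
  induction segs generalizing seen with
  | nil => simp [uA]
  | cons p r ih =>
    obtain ⟨s, t⟩ := p
    by_cases hs : PySem.Str.startswith s "SPEAKER_" = true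
    · simp only [List.filter_cons]
      rw [if_pos hs]
      simp only [List.map_cons, List.foldl_cons, uA]
      by_cases hm : s ∈ seen
      · rw [PySem.Set.add_of_mem hm, ih, if_neg (by simp [hm])]
      · rw [PySem.Set.add_of_not_mem hm, ih, if_pos ⟨hs, hm⟩]
        simp
    · simp only [List.filter_cons]
      rw [if_neg hs, ih]
      simp only [uA]
      rw [if_neg (by rintro ⟨hsp, _⟩; exact hs hsp)]

lemma uA_sub (segs : List (String × String)) (seen : List String) :
    ∀ x ∈ uA seen segs, PySem.Str.startswith x "SPEAKER_" = true := by
  induction segs generalizing seen with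
  | nil => simp [uA]
  | cons p r ih =>
    obtain ⟨s, t⟩ := p
    intro x hx
    simp only [uA] at hx
    by_cases hc : PySem.Str.startswith s "SPEAKER_" = true ∧ s ∉ seen
    · rw [if_pos hc] at hx
      rcases List.mem_cons.mp hx with h | h
      · exact h ▸ hc.1
      · exact ih _ x h
    · rw [if_neg hc] at hx
      exact ih seen x hx

-- the master invariant lemma for A's loop
lemma relabelGoA_eq (U : List String)
    (hUspk : ∀ x ∈ U, PySem.Str.startswith x "SPEAKER_" = true) :
    ∀ (rest : List (String × String)) (d : PySem.Dict String String) (next : Int)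
      (acc : List (String × String)) (U₀ K : List String),
      U = U₀ ++ uA U₀ rest →
      next = (U₀.length : Int) + 1 →
      (∀ s, d.contains s = true ↔ s ∈ K) →
      (∀ s ∈ U₀, s ∈ K) →
      (∀ s ∈ K, PySem.Str.startswith s "SPEAKER_" = true → s ∈ U₀) →
      (∀ s ∈ K, d.getD s s = if s ∈ U then gLab 1 U s else s) →
      relabelGoA rest d next acc
        = acc.reverse ++ rest.map (fun p => ((if p.1 ∈ U then gLab 1 U p.1 else p.1), p.2)) := by
  intro rest
  induction rest with
  | nil => intro d next acc U₀ K _ _ _ _ _ _; simp [relabelGoA]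
  | cons p r ih =>
    intro d next acc U₀ K hU hnext hcont hK1 hK2 hval
    obtain ⟨s, t⟩ := p
    by_cases hk : s ∈ K
    · -- already in the mapping
      have hc : d.contains s = true := (hcont s).mpr hk
      have hU' : U = U₀ ++ uA U₀ r := by
        have he : uA U₀ ((s, t) :: r) = uA U₀ r := by
          simp only [uA]
          rw [if_neg]
          rintro ⟨hsp, hnot⟩
          exact hnot (hK2 s hk hsp)
        rw [hU, he]
      rw [relabelGoA, if_pos hc,
        ih d next _ U₀ K hU' hnext hcont hK1 hK2 hval]
      simp [hval s hk]
    · have hc : ¬ d.contains s = true := fun h => hk ((hcont s).mp h)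
      have hs0 : s ∉ U₀ := fun h => hk (hK1 s h)
      by_cases hs : PySem.Str.startswith s "SPEAKER_" = true
      · -- fresh SPEAKER_ label
        have huA : uA U₀ ((s, t) :: r) = s :: uA (U₀ ++ [s]) r := by
          simp only [uA]
          rw [if_pos ⟨hs, hs0⟩]
        have hU' : U = (U₀ ++ [s]) ++ uA (U₀ ++ [s]) r := by
          rw [hU, huA]; simp
        have hlab : (if s ∈ U then gLab 1 U s else s)
            = "Speaker " ++ PySem.Int.toStr ((U₀.length : Int) + 1) := by
          have hmem : s ∈ U := by rw [hU, huA]; simp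
          rw [if_pos hmem, hU, huA, gLab_append_of_not_mem _ _ _ _ hs0, gLab_cons_self,
            Int.add_comm]
        rw [relabelGoA, if_neg (by simpa using hc), if_pos hs]
        rw [ih _ (next + 1) _ (U₀ ++ [s]) (s :: K) hU'
          (by simp only [hnext, List.length_append, List.length_cons, List.length_nil]; omega)
          (by intro s'; rw [PySem.Dict.contains_insert]; by_cases h : s' = s <;>
                simp [h, hcont s'])
          (by intro s' h; rcases List.mem_append.mp h with h | h
              · exact List.mem_cons_of_mem _ (hK1 s' h)
              · simp at h; simp [h])
          (by intro s' h hsp; rcases List.mem_cons.mp h with h | h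
              · simp [h]
              · exact List.mem_append_left _ (hK2 s' h hsp))
          (by intro s' h
              rcases List.mem_cons.mp h with h | h
              · subst h
                rw [PySem.Dict.getD_insert_self, hlab, hnext]
              · have hne : s' ≠ s := fun he => hk (he ▸ h)
                rw [PySem.Dict.getD_insert_of_ne _ _ _ hne, hval s' h])]
        rw [PySem.Dict.getD_insert_self]
        simp only [List.map_cons, List.reverse_cons, List.append_assoc,
          List.singleton_append]
        rw [hlab, hnext]
      · -- fresh non-SPEAKER label: maps to itself
        have hnotU : s ∉ U := fun h => hs (hUspk s h)
        have hU' : U = U₀ ++ uA U₀ r := by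
          have he : uA U₀ ((s, t) :: r) = uA U₀ r := by
            simp only [uA]
            rw [if_neg]
            rintro ⟨hsp, _⟩
            exact hs hsp
          rw [hU, he]
        rw [relabelGoA, if_neg (by simpa using hc), if_neg hs]
        rw [ih _ next _ U₀ (s :: K) hU' hnext
          (by intro s'; rw [PySem.Dict.contains_insert]; by_cases h : s' = s <;>
                simp [h, hcont s'])
          (fun s' h => List.mem_cons_of_mem _ (hK1 s' h))
          (by intro s' h hsp; rcases List.mem_cons.mp h with h | h
              · exact absurd (h ▸ hsp) hs
              · exact hK2 s' h hsp)
          (by intro s' h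
              rcases List.mem_cons.mp h with h | h
              · subst h; rw [PySem.Dict.getD_insert_self]; simp [hnotU]
              · have hne : s' ≠ s := fun he => hk (he ▸ h)
                rw [PySem.Dict.getD_insert_of_ne _ _ _ hne, hval s' h])]
        rw [PySem.Dict.getD_insert_self]
        simp [hnotU]

-- ===== VERDICT (by name: the statement is the Claim_ definition above) =====
theorem relabel_speakers_py_spec : Claim_equal_relabel_speakers_py := by
  intro segs _
  unfold Spec_relabel_speakers_py relabel_speakers_py relabel_speakers_py_alt
  set U : List String :=
    PySem.List.dedup ((segs.filter (fun p => PySem.Str.startswith p.1 "SPEAKER_")).map Prod.fst)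
    with hUdef
  have hUA : U = uA [] segs := by
    rw [hUdef, PySem.List.dedup_eq_ofList, PySem.Set.ofList_eq_foldl]
    simpa using dedup_filter_eq_uA segs []
  have hnd : U.Nodup := hUdef ▸ PySem.List.nodup_dedup _
  have hspk : ∀ x ∈ U, PySem.Str.startswith x "SPEAKER_" = true := by
    rw [hUA]; exact uA_sub segs []
  rw [relabelGoA_eq U hspk segs PySem.Dict.empty 1 [] [] []
    (by simpa using hUA) (by simp)
    (by simp [PySem.Dict.contains_empty]) (by simp) (by simp) (by simp)]
  simp only [List.reverse_nil, List.nil_append]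
  apply List.map_congr_left
  intro p _
  rw [getD_enumFold U 1 PySem.Dict.empty p.1 p.1 hnd]
  by_cases h : p.1 ∈ U <;> simp [h, PySem.Dict.getD_empty]
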